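-- pv_equiv track=rewrite | github.com/Hejow/Algorithm | Programmers/호텔 방 배정.py | solution
-- ===== SOURCE A (Python) =====
-- def find(x, rooms):
--     if x not in rooms:
--         rooms[x] = x+1
--         return x
--
--     rooms[x] = find(rooms[x], rooms)
--     return rooms[x]
--
-- def solution(k, room_number):
--     ans = []
--     rooms = {}
--
--     for r in room_number:
--         assginment = find(r, rooms)
--         ans.append(assginment)
--         rooms[assginment] = assginment+1
--
--     return ans
-- ===== SOURCE B (Python) =====
-- def solution(k, room_number):
--     # Same assignments computed directly: each request gets the smallest
--     # unoccupied room >= r, found by a linear upward probe over a set of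
--     # occupied rooms (no skip-pointer dict, no recursion).
--     occupied = set()
--     ans = []
--     for r in room_number:
--         x = r
--         while x in occupied:
--             x += 1
--         occupied.add(x)
--         ans.append(x)
--     return ans
-- ===== Notes on version B (the rewrite author's own statement) =====
-- stated objective: simpler
-- what changed: Replaces the recursive union-find dict with path compression by a plain set of occupied rooms and a linear upward probe to the first free room >= r, which yields the identical assignment sequence.
import Mathlib
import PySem

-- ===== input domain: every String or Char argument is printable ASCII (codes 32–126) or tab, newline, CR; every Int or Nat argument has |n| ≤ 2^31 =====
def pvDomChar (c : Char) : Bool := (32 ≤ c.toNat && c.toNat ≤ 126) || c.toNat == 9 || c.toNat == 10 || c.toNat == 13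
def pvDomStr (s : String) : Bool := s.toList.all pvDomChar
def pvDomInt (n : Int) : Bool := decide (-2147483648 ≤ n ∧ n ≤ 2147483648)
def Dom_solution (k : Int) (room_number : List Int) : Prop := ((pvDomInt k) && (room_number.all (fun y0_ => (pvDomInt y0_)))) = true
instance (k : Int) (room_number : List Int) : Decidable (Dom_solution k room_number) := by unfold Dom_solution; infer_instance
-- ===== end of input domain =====

-- B drops A's recursive path-compressing dict: it keeps a set of occupied rooms and probes
-- linearly upward for the first free room (same assignments, simpler bookkeeping).

-- ===== PORT A =====
-- fuel only makes the recursion total; each chain step strictly increases the key, so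
-- fuel 2*|room_number|+2 never runs out on the calls `solution` makes.
def findA : Nat → Int → PySem.Dict Int Int → Int × PySem.Dict Int Int
  | 0, x, d => (x, d.insert x (x + 1))
  | n + 1, x, d =>
    match d.get? x with
    | none => (x, d.insert x (x + 1))
    | some y =>
      let p := findA n y d
      let d2 := p.2.insert x p.1
      (d2.getD x 0, d2)

def solution (k : Int) (room_number : List Int) : List Int :=
  (room_number.foldl
    (fun (st : List Int × PySem.Dict Int Int) r =>
      let p := findA (2 * room_number.length + 2) r st.2
      (st.1 ++ [p.1], p.2.insert p.1 (p.1 + 1)))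
    ([], PySem.Dict.empty)).1

-- ===== PORT B =====
-- the `while x in occupied: x += 1` loop; fuel |occupied|+1 is only the totality guard
-- (the probed rooms below the answer are distinct members of `occupied`).
def probeB : Nat → Int → PySem.Set Int → Int
  | 0, x, _ => x
  | n + 1, x, s => if PySem.Set.contains s x then probeB n (x + 1) s else x

def solution_alt (k : Int) (room_number : List Int) : List Int :=
  (room_number.foldl
    (fun (st : PySem.Set Int × List Int) r =>
      let x := probeB (st.1.length + 1) r st.1
      (PySem.Set.add st.1 x, st.2 ++ [x]))
    (PySem.Set.empty, [])).2

-- ===== PRECONDITION & SPEC =====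
def Spec_solution (k : Int) (room_number : List Int) (out : List Int) : Prop := out = solution_alt k room_number
instance (k : Int) (room_number : List Int) (out : List Int) : Decidable (Spec_solution k room_number out) := by unfold Spec_solution; infer_instance

-- ===== CLAIM (what is proved, stated in full; the proofs are below) =====
def Claim_equal_solution : Prop := ∀ (k : Int) (room_number : List Int), Dom_solution k room_number → Spec_solution k room_number (solution k room_number)

-- ===== LEMMAS AND PROOFS =====

-- invariant of A's dict: every stored pointer jumps upward, over occupied rooms only
def InvD (d : PySem.Dict Int Int) : Prop :=
  ∀ x v, d.get? x = some v → x < v ∧ ∀ y, x < y → y < v → d.contains y = true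

-- f is the first room ≥ x that is free w.r.t. occupancy predicate P
def pFree (P : Int → Prop) (x f : Int) : Prop :=
  x ≤ f ∧ ¬ P f ∧ ∀ y, x ≤ y → y < f → P y

theorem probeB_succ_mem (n : Nat) (x : Int) (s : PySem.Set Int)
    (hx : PySem.Set.contains s x = true) : probeB (n + 1) x s = probeB n (x + 1) s := by
  simp only [probeB, hx]; rfl

theorem probeB_succ_not (n : Nat) (x : Int) (s : PySem.Set Int)
    (hx : PySem.Set.contains s x = false) : probeB (n + 1) x s = x := by
  simp only [probeB, hx]; rfl

theorem contains_false_of_not_mem (s : PySem.Set Int) (x : Int) (hx : x ∉ s) :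
    PySem.Set.contains s x = false := by
  cases h : PySem.Set.contains s x
  · rfl
  · exact absurd ((PySem.Set.contains_iff s x).1 h) hx

theorem filter_succ_lt (x : Int) : ∀ (s : List Int), x ∈ s → s.Nodup →
    (s.filter (fun y => decide (x + 1 ≤ y))).length < (s.filter (fun y => decide (x ≤ y))).length := by
  intro s
  induction s with
  | nil => intro h; cases h
  | cons a t ih =>
    intro hmem hnd
    have hnd' := hnd.of_cons
    by_cases hax : a = x
    · subst hax
      have hmono : (t.filter (fun y => decide (a + 1 ≤ y))).length ≤ (t.filter (fun y => decide (a ≤ y))).length :=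
        (List.monotone_filter_right t (fun y h => by simp at h ⊢; omega)).length_le
      have h1 : (decide (a + 1 ≤ a)) = false := by simp
      have h2 : (decide (a ≤ a)) = true := by simp
      simp only [List.filter_cons, h1, h2, Bool.false_eq_true, if_false, if_true, List.length_cons]
      omega
    · have hxt : x ∈ t := by
        rcases List.mem_cons.1 hmem with h | h
        · exact absurd h.symm hax
        · exact h
      have := ih hxt hnd'
      simp only [List.filter_cons]
      by_cases h1 : x + 1 ≤ a
      · have e1 : (decide (x + 1 ≤ a)) = true := decide_eq_true h1
        have e2 : (decide (x ≤ a)) = true := decide_eq_true (by omega)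
        simp only [e1, e2, if_true, List.length_cons]
        omega
      · have e1 : (decide (x + 1 ≤ a)) = false := decide_eq_false h1
        by_cases h2 : x ≤ a
        · have e2 : (decide (x ≤ a)) = true := decide_eq_true h2
          simp only [e1, e2, Bool.false_eq_true, if_false, if_true, List.length_cons]
          omega
        · have e2 : (decide (x ≤ a)) = false := decide_eq_false h2
          simp only [e1, e2, Bool.false_eq_true, if_false]
          omega

theorem probeB_pFree : ∀ (n : Nat) (x : Int) (s : PySem.Set Int), s.Nodup →
    (s.filter (fun y => decide (x ≤ y))).length < n → pFree (fun y => y ∈ s) x (probeB n x s) := by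
  intro n
  induction n with
  | zero => intro x s _ h; omega
  | succ n ih =>
    intro x s hnd hfuel
    by_cases hx : x ∈ s
    · rw [probeB_succ_mem n x s ((PySem.Set.contains_iff s x).2 hx)]
      have hrec := ih (x + 1) s hnd (by have := filter_succ_lt x s hx hnd; omega)
      obtain ⟨hle, hfree, hocc⟩ := hrec
      refine ⟨by omega, hfree, fun y h1 h2 => ?_⟩
      rcases eq_or_lt_of_le h1 with h | h
      · exact h ▸ hx
      · exact hocc y (by omega) h2
    · rw [probeB_succ_not n x s (contains_false_of_not_mem s x hx)]
      exact ⟨le_refl x, hx, fun y h1 h2 => absurd h2 (by omega)⟩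

-- [x, f) all occupied and occupancy list has no duplicates ⇒ f - x ≤ |s|
theorem gap_le (s : List Int) (hnd : s.Nodup) (x f : Int)
    (h : ∀ y, x ≤ y → y < f → y ∈ s) : f - x ≤ (s.length : Int) := by
  by_cases hle : x ≤ f
  · set n : Nat := (f - x).toNat with hn
    set L : List Int := (List.range n).map (fun i : Nat => x + (i : Int)) with hL
    have hLnd : L.Nodup := List.Nodup.map (fun a b hab => by omega) List.nodup_range
    have hLsub : L ⊆ s := by
      intro y hy
      simp only [hL, List.mem_map, List.mem_range] at hy
      obtain ⟨i, hi, rfl⟩ := hy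
      exact h _ (by omega) (by omega)
    have hcard : L.toFinset.card ≤ s.toFinset.card :=
      Finset.card_le_card (fun y hy => List.mem_toFinset.2 (hLsub (List.mem_toFinset.1 hy)))
    have h1 : L.toFinset.card = n := by
      rw [List.toFinset_card_of_nodup hLnd]
      simp [hL]
    have h2 : s.toFinset.card = s.length := List.toFinset_card_of_nodup hnd
    omega
  · omega

theorem findA_spec : ∀ (n : Nat) (x : Int) (d : PySem.Dict Int Int) (f : Int),
    InvD d → pFree (fun y => d.contains y = true) x f → (f - x).toNat < n →
    (findA n x d).1 = f ∧
    (∀ y, (findA n x d).2.contains y = (d.contains y || decide (y = f))) ∧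
    InvD ((findA n x d).2.insert f (f + 1)) := by
  intro n
  induction n with
  | zero => intro x d f _ _ h; omega
  | succ n ih =>
    intro x d f hinv hp hfuel
    obtain ⟨hle, hfree, hocc⟩ := hp
    cases hget : d.get? x with
    | none =>
      have hxnc : d.contains x = false := (PySem.Dict.get?_eq_none_iff_contains d x).1 hget
      have hfx : f = x := by
        rcases lt_or_eq_of_le hle with h | h
        · exact absurd (hocc x le_rfl h) (by simp [hxnc])
        · omega
      subst hfx
      have hres : findA (n + 1) f d = (f, d.insert f (f + 1)) := by
        simp only [findA, hget]
      refine ⟨by rw [hres], ?_, ?_⟩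
      · intro y
        rw [hres, PySem.Dict.contains_insert]
        by_cases hy : y = f
        · simp [hy, hxnc]
        · simp [hy]
      · rw [hres]
        simp only [PySem.Dict.insert_insert_self]
        intro z v hz
        by_cases hzf : z = f
        · subst hzf
          rw [PySem.Dict.get?_insert_self] at hz
          injection hz with hv
          exact ⟨by omega, fun y h1 h2 => absurd h2 (by omega)⟩
        · rw [PySem.Dict.get?_insert_of_ne _ _ hzf] at hz
          obtain ⟨hlt, hmid⟩ := hinv z v hz
          refine ⟨hlt, fun y h1 h2 => ?_⟩
          rw [PySem.Dict.contains_insert]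
          simp [hmid y h1 h2]
    | some w =>
      have hxc : d.contains x = true := by
        rw [PySem.Dict.contains_eq_isSome_get?, hget]; rfl
      have hxf : x ≠ f := fun h => hfree (h ▸ hxc)
      have hxltf : x < f := by
        rcases lt_or_eq_of_le hle with h | h
        · exact h
        · exact absurd h hxf
      obtain ⟨hxw, hxmid⟩ := hinv x w hget
      have hwf : w ≤ f := by
        by_contra hc
        exact hfree (hxmid f hxltf (by omega))
      obtain ⟨h1, h2, h3⟩ :=
        ih w d f hinv ⟨hwf, hfree, fun y hy1 hy2 => hocc y (by omega) hy2⟩ (by omega)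
      have hres : findA (n + 1) x d = (((findA n w d).2.insert x f).getD x 0, (findA n w d).2.insert x f) := by
        simp only [findA, hget, h1]
      have hgetd : ((findA n w d).2.insert x f).getD x 0 = f := PySem.Dict.getD_insert_self _ _ _ _
      refine ⟨by rw [hres, hgetd], ?_, ?_⟩
      · intro y
        rw [hres]
        simp only
        rw [PySem.Dict.contains_insert, h2 y]
        by_cases hy : y = x
        · simp [hy, hxc]
        · simp [hy]
      · rw [hres]
        simp only
        intro z v hz
        by_cases hzf : z = f
        · subst hzf
          rw [PySem.Dict.get?_insert_self] at hz
          injection hz with hv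
          exact ⟨by omega, fun y hy1 hy2 => absurd hy2 (by omega)⟩
        · rw [PySem.Dict.get?_insert_of_ne _ _ hzf] at hz
          by_cases hzx : z = x
          · subst hzx
            rw [PySem.Dict.get?_insert_self] at hz
            injection hz with hv
            refine ⟨by omega, fun y hy1 hy2 => ?_⟩
            have hyocc : d.contains y = true := hocc y (by omega) (by omega)
            rw [PySem.Dict.contains_insert, PySem.Dict.contains_insert, h2 y]
            simp [hyocc]
          · rw [PySem.Dict.get?_insert_of_ne _ _ hzx] at hz
            have hz' : ((findA n w d).2.insert f (f + 1)).get? z = some v := by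
              rw [PySem.Dict.get?_insert_of_ne _ _ hzf]; exact hz
            obtain ⟨hlt, hmid⟩ := h3 z v hz'
            refine ⟨hlt, fun y hy1 hy2 => ?_⟩
            have hy := hmid y hy1 hy2
            rw [PySem.Dict.contains_insert] at hy
            rw [PySem.Dict.contains_insert, PySem.Dict.contains_insert]
            simp only [Bool.or_eq_true] at hy ⊢
            rcases hy with h | h
            · exact Or.inl h
            · exact Or.inr (Or.inr h)

theorem loop_eq : ∀ (l : List Int) (F : Nat) (d : PySem.Dict Int Int) (s : PySem.Set Int) (acc : List Int),
    s.Nodup → (∀ y, (d.contains y = true) ↔ y ∈ s) → InvD d → s.length + l.length < F →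
    (l.foldl
      (fun (st : List Int × PySem.Dict Int Int) r =>
        let p := findA F r st.2
        (st.1 ++ [p.1], p.2.insert p.1 (p.1 + 1)))
      (acc, d)).1
    =
    (l.foldl
      (fun (st : PySem.Set Int × List Int) r =>
        let x := probeB (st.1.length + 1) r st.1
        (PySem.Set.add st.1 x, st.2 ++ [x]))
      (s, acc)).2 := by
  intro l
  induction l with
  | nil => intro F d s acc _ _ _ _; rfl
  | cons r l ih =>
    intro F d s acc hnd hiff hinv hF
    set f : Int := probeB (s.length + 1) r s with hf
    have hpf : pFree (fun y => y ∈ s) r f := by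
      refine probeB_pFree (s.length + 1) r s hnd ?_
      have := List.length_filter_le (fun y => decide (r ≤ y)) s
      omega
    obtain ⟨hle, hfree, hocc⟩ := hpf
    have hpd : pFree (fun y => d.contains y = true) r f := by
      refine ⟨hle, fun h => hfree ((hiff f).1 h), fun y h1 h2 => (hiff y).2 (hocc y h1 h2)⟩
    have hgap : f - r ≤ (s.length : Int) := gap_le s hnd r f hocc
    obtain ⟨hA1, hA2, hA3⟩ := findA_spec F r d f hinv hpd (by omega)
    have hadd : PySem.Set.add s f = s ++ [f] := PySem.Set.add_of_not_mem hfree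
    simp only [List.foldl_cons]
    rw [← hf, hA1]
    refine ih F ((findA F r d).2.insert f (f + 1)) (PySem.Set.add s f) (acc ++ [f])
      (PySem.Set.nodup_add s f hnd) ?_ hA3 ?_
    · intro y
      rw [PySem.Dict.contains_insert, hA2 y]
      constructor
      · intro h
        simp only [Bool.or_eq_true, beq_iff_eq, decide_eq_true_eq] at h
        rcases h with h | h | h
        · exact (PySem.Set.mem_add s f y).2 (Or.inr h)
        · exact (PySem.Set.mem_add s f y).2 (Or.inl ((hiff y).1 h))
        · exact (PySem.Set.mem_add s f y).2 (Or.inr h)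
      · intro h
        rcases (PySem.Set.mem_add s f y).1 h with h | h
        · simp [(hiff y).2 h]
        · simp [h]
    · rw [hadd]
      simp only [List.length_append, List.length_cons, List.length_nil] at hF ⊢
      omega

-- ===== VERDICT (by name: the statement is the Claim_ definition above) =====
theorem solution_spec : Claim_equal_solution := by
  intro k room_number _
  unfold Spec_solution solution solution_alt
  refine loop_eq room_number (2 * room_number.length + 2) PySem.Dict.empty PySem.Set.empty []
    List.nodup_nil ?_ ?_ ?_
  · intro y
    simp [PySem.Dict.contains_empty, PySem.Set.empty]
  · intro x v hx
    rw [PySem.Dict.get?_empty] at hx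
    cases hx
  · simp [PySem.Set.empty]
    omega
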